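-- pv_equiv track=rewrite | github.com/Web-Search-M-Course-Project/WSM_project | dataset/light.py | zipper2
-- ===== SOURCE A (Python) =====
-- def zipper2(l_paper_id:list, l_title:list, l_score:list):
--     all = list(zip(l_score, l_paper_id, l_title))
--     tmp1 = {}
--     for score,paper_id,title in all:
--         if title not in tmp1 or tmp1[title] < (score, paper_id):
--             tmp1[title] = (score, paper_id)
--     tmp2 = [(tmp1[title][0],tmp1[title][1],title) for title in tmp1]
--     return list(reversed(sorted(tmp2)))
--     pass
-- ===== SOURCE B (Python) =====
-- def zipper2(l_paper_id: list, l_title: list, l_score: list):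
--     # Sort all (score, paper_id, title) tuples descending once, then keep the
--     # first tuple seen for each title (which is that title's maximum).
--     result = []
--     seen = set()
--     for t in sorted(zip(l_score, l_paper_id, l_title), reverse=True):
--         if t[2] not in seen:
--             seen.add(t[2])
--             result.append(t)
--     return result
-- ===== Notes on version B (the rewrite author's own statement) =====
-- stated objective: simpler
-- what changed: Instead of aggregating per-title maxima in a dict and then sorting the deduplicated triples, B sorts all triples descending once and keeps the first occurrence of each title in a single scan with a seen-set.
import Mathlib
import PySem

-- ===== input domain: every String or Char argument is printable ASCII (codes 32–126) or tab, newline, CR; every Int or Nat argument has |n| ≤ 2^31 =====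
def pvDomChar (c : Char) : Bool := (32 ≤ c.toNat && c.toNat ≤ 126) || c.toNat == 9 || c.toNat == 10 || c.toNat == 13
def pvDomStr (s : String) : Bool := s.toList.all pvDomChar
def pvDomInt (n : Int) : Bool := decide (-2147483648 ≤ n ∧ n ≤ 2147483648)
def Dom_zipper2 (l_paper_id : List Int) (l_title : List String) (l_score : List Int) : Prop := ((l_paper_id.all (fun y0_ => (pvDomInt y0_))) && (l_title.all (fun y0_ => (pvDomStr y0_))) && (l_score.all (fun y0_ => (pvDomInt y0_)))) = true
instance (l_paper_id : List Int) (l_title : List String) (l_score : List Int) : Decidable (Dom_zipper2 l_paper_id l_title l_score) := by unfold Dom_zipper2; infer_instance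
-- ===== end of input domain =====

-- B sorts all (score, paper_id, title) triples descending once and keeps the first
-- occurrence of each title in one scan, instead of A's per-title max dict + sort;
-- objective: simpler.

-- Python's lexicographic order on the triple (score, paper_id, title), as a key
-- into the lexicographic product type (Python compares tuples left to right;
-- Python's str '<' is Lean's '<' on String, per PYSEM).
def tkey (x : Int × Int × String) : Int ×ₗ Int ×ₗ String :=
  toLex (x.1, toLex (x.2.1, x.2.2))

-- ===== PORT A =====
-- Python's '<' on the pair (score, paper_id): lexicographic.
def pairLtA (a b : Int × Int) : Bool :=
  decide (a.1 < b.1) || (decide (a.1 = b.1) && decide (a.2 < b.2))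

-- the body of A's 'for score,paper_id,title in all' loop
def stepA (d : PySem.Dict String (Int × Int)) (x : Int × Int × String) :
    PySem.Dict String (Int × Int) :=
  match d.get? x.2.2 with
  | none => d.insert x.2.2 (x.1, x.2.1)                 -- 'title not in tmp1'
  | some v =>                                           -- 'tmp1[title] < (score, paper_id)'
      if pairLtA v (x.1, x.2.1) then d.insert x.2.2 (x.1, x.2.1) else d

def zipper2 (l_paper_id : List Int) (l_title : List String) (l_score : List Int) :
    List (Int × Int × String) :=
  let all := l_score.zip (l_paper_id.zip l_title)
  let tmp1 := all.foldl stepA PySem.Dict.empty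
  let tmp2 := tmp1.items.map (fun p => (p.2.1, p.2.2, p.1))
  (PySem.List.sorted tmp2 tkey false).reverse

-- ===== PORT B =====
-- the body of B's loop: skip titles already seen, otherwise record title and tuple
def stepB (acc : PySem.Set String × List (Int × Int × String)) (x : Int × Int × String) :
    PySem.Set String × List (Int × Int × String) :=
  if PySem.Set.contains acc.1 x.2.2 then acc else (PySem.Set.add acc.1 x.2.2, acc.2 ++ [x])

def zipper2_alt (l_paper_id : List Int) (l_title : List String) (l_score : List Int) :
    List (Int × Int × String) :=
  let s := PySem.List.sorted (l_score.zip (l_paper_id.zip l_title)) tkey true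
  (s.foldl stepB (([] : PySem.Set String), [])).2

-- ===== PRECONDITION & SPEC =====
def Spec_zipper2 (l_paper_id : List Int) (l_title : List String) (l_score : List Int) (out : List (Int × Int × String)) : Prop := out = zipper2_alt l_paper_id l_title l_score
instance (l_paper_id : List Int) (l_title : List String) (l_score : List Int) (out : List (Int × Int × String)) : Decidable (Spec_zipper2 l_paper_id l_title l_score out) := by unfold Spec_zipper2; infer_instance

-- ===== CLAIM (what is proved, stated in full; the proofs are below) =====
def Claim_equal_zipper2 : Prop := ∀ (l_paper_id : List Int) (l_title : List String) (l_score : List Int), Dom_zipper2 l_paper_id l_title l_score → Spec_zipper2 l_paper_id l_title l_score (zipper2 l_paper_id l_title l_score)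

-- ===== LEMMAS AND PROOFS =====

theorem tkey_injective : Function.Injective tkey := by
  intro x y h
  have h' := toLex.injective h
  have h2 := toLex.injective (congrArg Prod.snd h')
  exact Prod.ext (congrArg Prod.fst h') (Prod.ext (congrArg Prod.fst h2) (congrArg Prod.snd h2))

-- pairLtA decides the strict tkey order between same-title triples
theorem pairLtA_iff (a b : Int × Int) (t : String) :
    pairLtA a b = true ↔ tkey (a.1, a.2, t) < tkey (b.1, b.2, t) := by
  simp [pairLtA, tkey, Prod.Lex.lt_iff]

-- the "intended value" predicate both programs compute per title:
-- x is a triple of the input whose (score, paper_id, title) is lexicographically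
-- maximal among the input triples sharing its title
def Best (xs : List (Int × Int × String)) (x : Int × Int × String) : Prop :=
  x ∈ xs ∧ ∀ y ∈ xs, y.2.2 = x.2.2 → tkey y ≤ tkey x

theorem Best_unique (xs : List (Int × Int × String)) (x y : Int × Int × String)
    (hx : Best xs x) (hy : Best xs y) (ht : x.2.2 = y.2.2) : x = y := by
  have h1 := hy.2 x hx.1 ht
  have h2 := hx.2 y hy.1 ht.symm
  exact tkey_injective (le_antisymm h2 h1).symm ▸ rfl

theorem Best_congr (xs ys : List (Int × Int × String))
    (h : ∀ y, y ∈ xs ↔ y ∈ ys) (x : Int × Int × String) : Best xs x ↔ Best ys x := by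
  unfold Best
  constructor
  · exact fun ⟨h1, h2⟩ => ⟨(h x).mp h1, fun y hy => h2 y ((h y).mpr hy)⟩
  · exact fun ⟨h1, h2⟩ => ⟨(h x).mpr h1, fun y hy => h2 y ((h y).mp hy)⟩

-- ---- A side: the dict fold computes Best per title ----

theorem dictA_none (xs : List (Int × Int × String)) (t : String) :
    ((xs.foldl stepA PySem.Dict.empty).get? t = none ↔ ∀ y ∈ xs, y.2.2 ≠ t) := by
  induction xs using List.reverseRecOn with
  | nil => simp [PySem.Dict.get?_empty]
  | append_singleton xs x ih =>
      rw [List.foldl_append, List.foldl_cons, List.foldl_nil]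
      have key : ∀ d' : PySem.Dict String (Int × Int),
          (∃ v, d' = (xs.foldl stepA PySem.Dict.empty).insert x.2.2 v) ∨
            (d' = xs.foldl stepA PySem.Dict.empty ∧
              (xs.foldl stepA PySem.Dict.empty).get? x.2.2 ≠ none) →
          (d'.get? t = none ↔ ∀ y ∈ xs ++ [x], y.2.2 ≠ t) := by
        intro d' hd'
        by_cases ht : t = x.2.2
        · subst ht
          constructor
          · intro hn
            rcases hd' with ⟨v, rfl⟩ | ⟨rfl, hne⟩
            · rw [PySem.Dict.get?_insert] at hn; simp at hn
            · exact absurd hn hne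
          · intro hall
            exact absurd rfl (hall x (by simp))
        · have hget : d'.get? t = (xs.foldl stepA PySem.Dict.empty).get? t := by
            rcases hd' with ⟨v, rfl⟩ | ⟨rfl, -⟩
            · exact PySem.Dict.get?_insert_of_ne _ _ ht
            · rfl
          rw [hget, ih]
          constructor
          · intro hall y hy
            rcases List.mem_append.mp hy with hy' | hy'
            · exact hall y hy'
            · rcases List.mem_singleton.mp hy' with rfl
              exact fun he => ht he.symm
          · intro hall y hy
            exact hall y (List.mem_append.mpr (Or.inl hy))
      rcases hdx : (xs.foldl stepA PySem.Dict.empty).get? x.2.2 with _ | v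
      · exact key _ (Or.inl ⟨(x.1, x.2.1), by rw [stepA, hdx]⟩)
      · by_cases hlt : pairLtA v (x.1, x.2.1) = true
        · exact key _ (Or.inl ⟨(x.1, x.2.1), by rw [stepA, hdx]; simp only [hlt, if_pos]⟩)
        · refine key _ (Or.inr ⟨?_, ?_⟩)
          · rw [stepA, hdx]; simp only [hlt, Bool.false_eq_true, if_false]
          · rw [hdx]; exact Option.some_ne_none v

theorem dictA_nodup_keys (xs : List (Int × Int × String)) :
    (xs.foldl stepA PySem.Dict.empty).keys.Nodup := by
  induction xs using List.reverseRecOn with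
  | nil => simp [PySem.Dict.keys_empty]
  | append_singleton xs x ih =>
      rw [List.foldl_append, List.foldl_cons, List.foldl_nil]
      set d := xs.foldl stepA PySem.Dict.empty with hd
      have hins : ∀ v : Int × Int, ((d.insert x.2.2 v).keys).Nodup := by
        intro v
        by_cases hc : d.contains x.2.2 = true
        · rw [PySem.Dict.keys_insert_of_contains _ _ hc]; exact ih
        · rw [PySem.Dict.keys_insert_of_not_contains _ _ (by simpa using hc)]
          refine List.Nodup.append ih (List.nodup_singleton _) ?_
          intro a ha hb
          rcases List.mem_singleton.mp hb with rfl
          exact hc ((PySem.Dict.contains_iff_mem_keys _ _).mpr ha)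
      rcases hdx : d.get? x.2.2 with _ | v
      · rw [stepA, hdx]; exact hins _
      · by_cases hlt : pairLtA v (x.1, x.2.1) = true
        · rw [stepA, hdx]; simp only [hlt, if_pos]; exact hins _
        · rw [stepA, hdx]; simp only [hlt, Bool.false_eq_true, if_false]; exact ih

theorem dictA_some (xs : List (Int × Int × String)) (t : String) (p : Int × Int)
    (h : (xs.foldl stepA PySem.Dict.empty).get? t = some p) :
    Best xs (p.1, p.2, t) := by
  induction xs using List.reverseRecOn generalizing p with
  | nil => simp [PySem.Dict.get?_empty] at h
  | append_singleton xs x ih =>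
      rw [List.foldl_append, List.foldl_cons, List.foldl_nil] at h
      set d := xs.foldl stepA PySem.Dict.empty with hd
      by_cases ht : t = x.2.2
      · subst ht
        rcases hdx : d.get? x.2.2 with _ | v
        · rw [stepA, hdx, PySem.Dict.get?_insert, if_pos rfl] at h
          have hp : p = (x.1, x.2.1) := Option.some.inj h.symm
          subst hp
          have hnone := (dictA_none xs x.2.2).mp (by rw [← hd]; exact hdx)
          refine ⟨List.mem_append.mpr (Or.inr (by simp)), ?_⟩
          intro y hy hyt
          rcases List.mem_append.mp hy with hy' | hy'
          · exact absurd hyt (hnone y hy')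
          · rcases List.mem_singleton.mp hy' with rfl; exact le_refl _
        · have hbv : Best xs (v.1, v.2, x.2.2) := ih v hdx
          by_cases hlt : pairLtA v (x.1, x.2.1) = true
          · rw [stepA, hdx] at h; simp only [hlt, if_pos] at h
            rw [PySem.Dict.get?_insert, if_pos rfl] at h
            have hp : p = (x.1, x.2.1) := Option.some.inj h.symm
            subst hp
            refine ⟨List.mem_append.mpr (Or.inr (by simp)), ?_⟩
            intro y hy hyt
            rcases List.mem_append.mp hy with hy' | hy'
            · have hle := hbv.2 y hy' hyt
              have hvlt := (pairLtA_iff v (x.1, x.2.1) x.2.2).mp hlt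
              exact le_trans hle hvlt.le
            · rcases List.mem_singleton.mp hy' with rfl; exact le_refl _
          · rw [stepA, hdx] at h; simp only [hlt, Bool.false_eq_true, if_false] at h
            rw [hdx] at h
            have hp : p = v := Option.some.inj h.symm
            subst hp
            refine ⟨List.mem_append.mpr (Or.inl hbv.1), ?_⟩
            intro y hy hyt
            rcases List.mem_append.mp hy with hy' | hy'
            · exact hbv.2 y hy' hyt
            · rcases List.mem_singleton.mp hy' with rfl
              exact not_lt.mp (fun hc => hlt ((pairLtA_iff _ _ _).mpr hc))
      · have hget : d.get? t = some p := by
          rcases hdx : d.get? x.2.2 with _ | v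
          · rw [stepA, hdx, PySem.Dict.get?_insert_of_ne _ _ ht] at h; exact h
          · by_cases hlt : pairLtA v (x.1, x.2.1) = true
            · rw [stepA, hdx] at h; simp only [hlt, if_pos] at h
              rw [PySem.Dict.get?_insert_of_ne _ _ ht] at h; exact h
            · rw [stepA, hdx] at h; simp only [hlt, Bool.false_eq_true, if_false] at h; exact h
        have hb := ih p hget
        refine ⟨List.mem_append.mpr (Or.inl hb.1), ?_⟩
        intro y hy hyt
        rcases List.mem_append.mp hy with hy' | hy'
        · exact hb.2 y hy' hyt
        · rcases List.mem_singleton.mp hy' with rfl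
          exact absurd hyt.symm ht

theorem dictA_some_iff (xs : List (Int × Int × String)) (t : String) (p : Int × Int) :
    (xs.foldl stepA PySem.Dict.empty).get? t = some p ↔ Best xs (p.1, p.2, t) := by
  constructor
  · exact dictA_some xs t p
  · intro hb
    rcases hq : (xs.foldl stepA PySem.Dict.empty).get? t with _ | q
    · exact absurd hb.1 (fun hm => (dictA_none xs t).mp hq _ hm rfl)
    · have hbq := dictA_some xs t q hq
      have := Best_unique xs (p.1, p.2, t) (q.1, q.2, t) hb hbq rfl
      have hpq : p = q := by simpa [Prod.ext_iff] using this
      rw [hpq]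

theorem mem_tmp2_iff (xs : List (Int × Int × String)) (x : Int × Int × String) :
    x ∈ ((xs.foldl stepA PySem.Dict.empty).items.map (fun p => (p.2.1, p.2.2, p.1))) ↔
      Best xs x := by
  rw [List.mem_map]
  constructor
  · rintro ⟨⟨t, v⟩, hm, rfl⟩
    exact dictA_some xs t v
      (((PySem.Dict.get?_eq_some_iff_mem_items _ _ _ (dictA_nodup_keys xs)).mpr hm))
  · intro hb
    refine ⟨(x.2.2, (x.1, x.2.1)), ?_, rfl⟩
    exact (PySem.Dict.get?_eq_some_iff_mem_items _ _ _ (dictA_nodup_keys xs)).mp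
      ((dictA_some_iff xs x.2.2 (x.1, x.2.1)).mpr hb)

theorem tmp2_titles_nodup (xs : List (Int × Int × String)) :
    (((xs.foldl stepA PySem.Dict.empty).items.map (fun p => (p.2.1, p.2.2, p.1))).map
      (fun y => y.2.2)).Nodup := by
  rw [List.map_map]
  have : ((fun y : Int × Int × String => y.2.2) ∘ (fun p : String × Int × Int => (p.2.1, p.2.2, p.1)))
      = fun p : String × Int × Int => p.1 := rfl
  rw [this]
  exact dictA_nodup_keys xs

-- ---- B side: the seen-set scan keeps the first triple of each title ----

-- structural form of B's loop
def firstPer : List (Int × Int × String) → PySem.Set String → List (Int × Int × String)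
  | [], _ => []
  | x :: xs, seen =>
      if PySem.Set.contains seen x.2.2 then firstPer xs seen
      else x :: firstPer xs (PySem.Set.add seen x.2.2)

theorem foldB_eq (S : List (Int × Int × String)) :
    ∀ (seen : PySem.Set String) (acc : List (Int × Int × String)),
      (S.foldl stepB (seen, acc)).2 = acc ++ firstPer S seen := by
  induction S with
  | nil => simp [firstPer]
  | cons x xs ih =>
      intro seen acc
      by_cases h : x.2.2 ∈ seen
      · have hc : PySem.Set.contains seen x.2.2 = true := (PySem.Set.contains_iff _ _).mpr h
        rw [List.foldl_cons, firstPer, if_pos hc]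
        simp only [stepB, hc, if_pos]
        exact ih seen acc
      · have hc : PySem.Set.contains seen x.2.2 = false :=
          Bool.not_eq_true _ ▸ fun hcc => h ((PySem.Set.contains_iff _ _).mp hcc)
        rw [List.foldl_cons, firstPer, if_neg (by simp [h])]
        simp only [stepB, hc, Bool.false_eq_true, if_false]
        rw [ih _ _, List.append_assoc, List.singleton_append]

theorem firstPer_sublist (S : List (Int × Int × String)) :
    ∀ (seen : PySem.Set String), (firstPer S seen).Sublist S := by
  induction S with
  | nil => simp [firstPer]
  | cons x xs ih =>
      intro seen
      by_cases h : x.2.2 ∈ seen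
      · have hc : PySem.Set.contains seen x.2.2 = true := (PySem.Set.contains_iff _ _).mpr h
        rw [firstPer, if_pos hc]
        exact (ih seen).trans (List.sublist_cons_self x xs)
      · rw [firstPer, if_neg (by simp [h])]
        exact (ih _).cons₂ x

theorem firstPer_titles_nodup (S : List (Int × Int × String)) :
    ∀ (seen : PySem.Set String),
    ((firstPer S seen).map (fun y => y.2.2)).Nodup ∧
      ∀ y ∈ firstPer S seen, ¬ y.2.2 ∈ seen := by
  induction S with
  | nil => simp [firstPer]
  | cons x xs ih =>
      intro seen
      by_cases h : x.2.2 ∈ seen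
      · have hc : PySem.Set.contains seen x.2.2 = true := (PySem.Set.contains_iff _ _).mpr h
        rw [firstPer, if_pos hc]
        exact ih seen
      · have hns : ¬ x.2.2 ∈ seen := h
        obtain ⟨hnd, hsub⟩ := ih (PySem.Set.add seen x.2.2)
        rw [firstPer, if_neg (by simp [h])]
        simp only [List.map_cons, List.nodup_cons]
        refine ⟨⟨?_, hnd⟩, ?_⟩
        · intro hmem
          obtain ⟨y, hy, hyt⟩ := List.mem_map.mp hmem
          exact hsub y hy ((PySem.Set.mem_add seen x.2.2 y.2.2).mpr (Or.inr hyt))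
        · intro y hy
          rcases List.mem_cons.mp hy with rfl | hy'
          · exact hns
          · exact fun hm => hsub y hy' ((PySem.Set.mem_add seen x.2.2 y.2.2).mpr (Or.inl hm))

theorem mem_firstPer_iff (S : List (Int × Int × String)) :
    ∀ (seen : PySem.Set String) (x : Int × Int × String),
      x ∈ firstPer S seen ↔
        ¬ x.2.2 ∈ seen ∧ ∃ pre suf, S = pre ++ x :: suf ∧ ∀ y ∈ pre, y.2.2 ≠ x.2.2 := by
  induction S with
  | nil =>
      intro seen x
      simp only [firstPer, List.not_mem_nil, false_iff, not_and]
      rintro - ⟨pre, suf, h, -⟩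
      exact absurd h (by simp)
  | cons z xs ih =>
      intro seen x
      constructor
      · intro hx
        by_cases h : z.2.2 ∈ seen
        · rw [firstPer, if_pos ((PySem.Set.contains_iff _ _).mpr h)] at hx
          obtain ⟨hns, pre, suf, heq, hpre⟩ := (ih seen x).mp hx
          have hzx : z.2.2 ≠ x.2.2 := by
            intro he
            exact hns (he ▸ h)
          exact ⟨hns, z :: pre, suf, by simp [heq], by
            intro y hy; rcases List.mem_cons.mp hy with rfl | hy'
            · exact hzx
            · exact hpre y hy'⟩
        · rw [firstPer, if_neg (by simp [h])] at hx
          rcases List.mem_cons.mp hx with rfl | hx'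
          · exact ⟨h, [], xs, rfl, by simp⟩
          · obtain ⟨hns, pre, suf, heq, hpre⟩ := (ih _ x).mp hx'
            have hns' : ¬ x.2.2 ∈ seen :=
              fun hm => hns ((PySem.Set.mem_add seen z.2.2 x.2.2).mpr (Or.inl hm))
            have hzx : z.2.2 ≠ x.2.2 :=
              fun he => hns ((PySem.Set.mem_add seen z.2.2 x.2.2).mpr (Or.inr he.symm))
            exact ⟨hns', z :: pre, suf, by simp [heq], by
              intro y hy; rcases List.mem_cons.mp hy with rfl | hy'
              · exact hzx
              · exact hpre y hy'⟩
      · rintro ⟨hns, pre, suf, heq, hpre⟩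
        by_cases h : z.2.2 ∈ seen
        · rw [firstPer, if_pos ((PySem.Set.contains_iff _ _).mpr h)]
          match pre, heq with
          | [], heq =>
              have : z = x := by simpa using congrArg (·.headI) heq
              exact absurd h (this ▸ hns)
          | p :: pre', heq =>
              have htl : xs = pre' ++ x :: suf := by simpa using congrArg (·.tail) heq
              exact (ih seen x).mpr ⟨hns, pre', suf, htl,
                fun y hy => hpre y (List.mem_cons_of_mem p hy)⟩
        · rw [firstPer, if_neg (by simp [h])]
          match pre, heq with
          | [], heq =>
              have : z = x := by simpa using congrArg (·.headI) heq
              exact this ▸ List.mem_cons_self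
          | p :: pre', heq =>
              have hz : p = z := by simpa using (congrArg (·.headI) heq).symm
              have htl : xs = pre' ++ x :: suf := by simpa using congrArg (·.tail) heq
              have hzx : z.2.2 ≠ x.2.2 := hz ▸ hpre p List.mem_cons_self
              refine List.mem_cons_of_mem z ((ih _ x).mpr ⟨?_, pre', suf, htl,
                fun y hy => hpre y (List.mem_cons_of_mem p hy)⟩)
              intro hm
              rcases (PySem.Set.mem_add seen z.2.2 x.2.2).mp hm with hm' | hm'
              · exact hns hm'
              · exact hzx hm'.symm

-- if x ∈ S dominates its title class, x is the first of its title in S (S desc-sorted)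
theorem best_decomp (S : List (Int × Int × String))
    (hS : S.Pairwise (fun a b => tkey b ≤ tkey a)) (x : Int × Int × String)
    (hb : Best S x) : ∃ pre suf, S = pre ++ x :: suf ∧ ∀ y ∈ pre, y.2.2 ≠ x.2.2 := by
  induction S with
  | nil => exact absurd hb.1 (List.not_mem_nil)
  | cons z xs ih =>
      by_cases hzx : z.2.2 = x.2.2
      · have hxz : tkey x ≤ tkey z := by
          rcases List.mem_cons.mp hb.1 with rfl | hx'
          · exact le_refl _
          · exact (List.pairwise_cons.mp hS).1 x hx'
        have hzle : tkey z ≤ tkey x := hb.2 z List.mem_cons_self hzx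
        have : z = x := tkey_injective (le_antisymm hzle hxz)
        exact ⟨[], xs, by rw [this]; rfl, by simp⟩
      · have hx' : x ∈ xs := by
          rcases List.mem_cons.mp hb.1 with rfl | hx'
          · exact absurd rfl hzx
          · exact hx'
        obtain ⟨pre, suf, heq, hpre⟩ := ih (List.pairwise_cons.mp hS).2
          ⟨hx', fun y hy ht => hb.2 y (List.mem_cons_of_mem z hy) ht⟩
        exact ⟨z :: pre, suf, by simp [heq], by
          intro y hy; rcases List.mem_cons.mp hy with rfl | hy'
          · exact hzx
          · exact hpre y hy'⟩

theorem decomp_best (S : List (Int × Int × String))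
    (hS : S.Pairwise (fun a b => tkey b ≤ tkey a)) (x : Int × Int × String)
    (h : ∃ pre suf, S = pre ++ x :: suf ∧ ∀ y ∈ pre, y.2.2 ≠ x.2.2) : Best S x := by
  obtain ⟨pre, suf, rfl, hpre⟩ := h
  constructor
  · exact List.mem_append.mpr (Or.inr List.mem_cons_self)
  · intro y hy ht
    rcases List.mem_append.mp hy with hy' | hy'
    · exact absurd ht (hpre y hy')
    · rcases List.mem_cons.mp hy' with rfl | hy''
      · exact le_refl _
      · exact (List.pairwise_cons.mp (List.pairwise_append.mp hS).2.1).1 y hy''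

theorem mem_firstPer_best (S : List (Int × Int × String))
    (hS : S.Pairwise (fun a b => tkey b ≤ tkey a)) (x : Int × Int × String) :
    x ∈ firstPer S [] ↔ Best S x := by
  rw [mem_firstPer_iff]
  constructor
  · rintro ⟨-, hdec⟩
    exact decomp_best S hS x hdec
  · intro hb
    exact ⟨by simp, best_decomp S hS x hb⟩

-- a weakly descending Nodup list is strictly descending in tkey
theorem strict_of_nodup (l : List (Int × Int × String))
    (hle : l.Pairwise (fun a b => tkey b ≤ tkey a)) (hnd : l.Nodup) :
    l.Pairwise (fun a b => tkey b < tkey a) := by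
  refine (hle.and hnd).imp ?_
  rintro a b ⟨h1, h2⟩
  exact lt_of_le_of_ne h1 (fun he => h2 (tkey_injective he.symm))

-- ===== VERDICT (by name: the statement is the Claim_ definition above) =====
theorem zipper2_spec : Claim_equal_zipper2 := by
  intro l_paper_id l_title l_score _
  unfold Spec_zipper2 zipper2 zipper2_alt
  set all := l_score.zip (l_paper_id.zip l_title) with hall
  set tmp2 := ((all.foldl stepA PySem.Dict.empty).items.map (fun p => (p.2.1, p.2.2, p.1)))
    with htmp2
  set S := PySem.List.sorted all tkey true with hS
  have hSpw : S.Pairwise (fun a b => tkey b ≤ tkey a) := PySem.List.sorted_pairwise_rev all tkey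
  have hB : (S.foldl stepB (([] : PySem.Set String), [])).2 = firstPer S [] := by
    rw [foldB_eq S [] []]; rfl
  rw [hB]
  -- membership of both candidate lists is Best
  have hmemS : ∀ y, y ∈ S ↔ y ∈ all := fun y => (PySem.List.sorted_perm all tkey true).mem_iff
  have hmemB : ∀ x, x ∈ firstPer S [] ↔ Best all x := by
    intro x
    rw [mem_firstPer_best S hSpw x]
    exact Best_congr S all hmemS x
  have hmemA : ∀ x, x ∈ tmp2 ↔ Best all x := fun x => mem_tmp2_iff all x
  -- both are Nodup
  have hndA : tmp2.Nodup := (tmp2_titles_nodup all).of_map _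
  have hndB : (firstPer S []).Nodup := ((firstPer_titles_nodup S []).1).of_map _
  -- firstPer S [] is a strictly descending rearrangement of tmp2
  have hperm : (firstPer S []).Perm tmp2 := by
    rw [List.perm_ext_iff_of_nodup hndB hndA]
    intro x
    rw [hmemB x, hmemA x]
  have hgtB : (firstPer S []).Pairwise (fun a b => tkey b < tkey a) :=
    strict_of_nodup _ (List.Pairwise.sublist (firstPer_sublist S []) hSpw) hndB
  -- and so is the reversed ascending sort of tmp2
  have hrev : (PySem.List.sorted tmp2 tkey false).reverse.Perm tmp2 :=
    (List.reverse_perm _).trans (PySem.List.sorted_perm tmp2 tkey false)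
  have hgtA : (PySem.List.sorted tmp2 tkey false).reverse.Pairwise
      (fun a b => tkey b < tkey a) := by
    refine strict_of_nodup _ ?_ (hrev.nodup_iff.mpr hndA)
    rw [List.pairwise_reverse]
    exact PySem.List.sorted_pairwise tmp2 tkey
  -- the descending sort of tmp2 names both lists
  have e1 := PySem.List.sorted_rev_eq_of_perm_of_pairwise_gt tmp2 _ tkey hrev hgtA
  have e2 := PySem.List.sorted_rev_eq_of_perm_of_pairwise_gt tmp2 _ tkey hperm hgtB
  rw [← e1, ← e2]
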